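-- pv_equiv track=rewrite | github.com/hRonalda/iot_challenges | Challenge2/cq8.py | group_topics_by_layer
-- ===== SOURCE A (Python) =====
-- def count_layers(topic):
--     """
--     Count the number of layers in a topic.
--     Example:
--     home/temp -> 2
--     home/room1/temp -> 3
--     """
--     return topic.count("/") + 1
--
-- def group_topics_by_layer(topics):
--     """
--     Group topics by their number of layers.
--     Returns a dictionary such as:
--     {
--         2: [topic1, topic2, ...],
--         3: [topic3, topic4, ...]
--     }
--     """
--     grouped = {}
--
--     for topic in topics:
--         layers = count_layers(topic)
--
--         if layers not in grouped:
--             grouped[layers] = []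
--
--         grouped[layers].append(topic)
--
--     return grouped
-- ===== SOURCE B (Python) =====
-- def count_layers(topic):
--     return topic.count("/") + 1
--
-- def group_topics_by_layer(topics):
--     # Two-pass: distinct layer counts in first-seen order, then one filter per key.
--     keys = list(dict.fromkeys(count_layers(t) for t in topics))
--     return {k: [t for t in topics if count_layers(t) == k] for k in keys}
-- ===== Notes on version B (the rewrite author's own statement) =====
-- stated objective: alternative
-- what changed: Replaces the incremental dict-building loop (insert-empty-then-append per topic) by a two-pass scheme: collect the distinct layer counts in first-seen order, then build each group with a filter over the topics.
import Mathlib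
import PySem

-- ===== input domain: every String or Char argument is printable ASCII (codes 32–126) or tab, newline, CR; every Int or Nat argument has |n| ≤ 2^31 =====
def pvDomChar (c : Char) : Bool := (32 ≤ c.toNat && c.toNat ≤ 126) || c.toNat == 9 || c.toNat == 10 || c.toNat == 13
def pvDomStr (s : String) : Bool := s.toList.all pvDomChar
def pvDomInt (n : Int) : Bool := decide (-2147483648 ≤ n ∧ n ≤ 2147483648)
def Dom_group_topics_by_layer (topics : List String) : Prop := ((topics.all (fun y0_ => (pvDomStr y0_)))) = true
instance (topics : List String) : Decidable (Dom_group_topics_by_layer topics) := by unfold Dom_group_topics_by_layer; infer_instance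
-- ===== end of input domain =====

-- B replaces A's single incremental dict-building pass by dedup-of-keys then one filter per key (alternative decomposition, same results).

-- ===== PORT A =====
def count_layers (topic : String) : Int :=
  (PySem.Str.count topic "/" : Int) + 1

def group_topics_by_layer (topics : List String) : List (Int × List String) :=
  (topics.foldl
    (fun grouped topic =>
      let layers := count_layers topic
      let grouped := if grouped.contains layers then grouped else grouped.insert layers ([] : List String)
      grouped.modify layers [] (fun l => l ++ [topic]))
    (PySem.Dict.empty : PySem.Dict Int (List String))).items

-- ===== PORT B =====
def group_topics_by_layer_alt (topics : List String) : List (Int × List String) :=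
  let keys := PySem.List.dedup (topics.map count_layers)
  keys.map (fun k => (k, topics.filter (fun t => count_layers t == k)))

-- ===== PRECONDITION & SPEC =====
def Spec_group_topics_by_layer (topics : List String) (out : List (Int × List String)) : Prop := out = group_topics_by_layer_alt topics
instance (topics : List String) (out : List (Int × List String)) : Decidable (Spec_group_topics_by_layer topics out) := by unfold Spec_group_topics_by_layer; infer_instance

-- ===== CLAIM (what is proved, stated in full; the proofs are below) =====
def Claim_equal_group_topics_by_layer : Prop := ∀ (topics : List String), Dom_group_topics_by_layer topics → Spec_group_topics_by_layer topics (group_topics_by_layer topics)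

-- ===== LEMMAS AND PROOFS =====

-- A's "insert [] if missing, then append" step is exactly a modify with default [].
lemma insert_then_modify (d : PySem.Dict Int (List String)) (k : Int) (t : String) :
    (if d.contains k then d else d.insert k ([] : List String)).modify k [] (fun l => l ++ [t])
      = d.modify k [] (fun l => l ++ [t]) := by
  by_cases h : d.contains k
  · simp [h]
  · have hf : d.contains k = false := by simpa using h
    have he : d.getD k ([] : List String) = [] := PySem.Dict.getD_of_not_contains d [] hf
    simp [hf, PySem.Dict.modify, PySem.Dict.getD_insert_self, PySem.Dict.insert_insert_self, he]

-- the value stored by A's loop under key c is exactly the filter B computes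
lemma getD_loop (topics : List String) (c : Int) :
    (topics.foldl (fun d t => d.modify (count_layers t) [] (fun l => l ++ [t]))
        (PySem.Dict.empty : PySem.Dict Int (List String))).getD c []
      = topics.filter (fun t => count_layers t == c) := by
  have h : topics.foldl (fun d t => d.modify (count_layers t) [] (fun l => l ++ [t]))
        (PySem.Dict.empty : PySem.Dict Int (List String))
      = (topics.map (fun t => (count_layers t, t))).foldl
          (fun d p => d.modify p.1 [] (fun l => l ++ [p.2]))
          (PySem.Dict.empty : PySem.Dict Int (List String)) := by
    rw [List.foldl_map]
  rw [h, PySem.Dict.getD_foldl_modify_append]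
  simp [List.filter_map, Function.comp_def]

-- ===== VERDICT (by name: the statement is the Claim_ definition above) =====
theorem group_topics_by_layer_spec : Claim_equal_group_topics_by_layer := by
  intro topics _
  unfold Spec_group_topics_by_layer group_topics_by_layer group_topics_by_layer_alt
  have hstep : (fun (grouped : PySem.Dict Int (List String)) (topic : String) =>
      let layers := count_layers topic
      let grouped := if grouped.contains layers then grouped else grouped.insert layers ([] : List String)
      grouped.modify layers [] (fun l => l ++ [topic]))
      = fun d t => d.modify (count_layers t) [] (fun l => l ++ [t]) := by
    funext d t
    exact insert_then_modify d (count_layers t) t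
  rw [hstep]
  set D := topics.foldl (fun d t => d.modify (count_layers t) [] (fun l => l ++ [t]))
      (PySem.Dict.empty : PySem.Dict Int (List String)) with hD
  have hnd : D.keys.Nodup := by
    rw [hD]
    exact PySem.Dict.nodup_keys_foldl_modify_key topics count_layers []
      (fun d t => fun l => l ++ [t]) PySem.Dict.empty PySem.Dict.nodup_keys_empty
  have hkeys : D.keys = PySem.List.dedup (topics.map count_layers) := by
    rw [hD, PySem.Dict.keys_foldl_modify_key]
    simp [PySem.Dict.keys_empty, PySem.Set.update_nil_left]
  rw [PySem.Dict.items_eq_map_keys D hnd [], hkeys]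
  apply List.map_congr_left
  intro k _
  rw [hD, getD_loop]
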